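-- pv_equiv track=rewrite | github.com/yubinbai/Codejam | round1A 2013/b/main.py | getGain
-- ===== SOURCE A (Python) =====
-- def getGain(E, R, N, value):
--
--     memo = [-1] * (E + 1)
--     prevMemo = [-1] * (E + 1)
--
--     # last activity
--     for i in range(E + 1):
--         memo[i] = value[-1] * i
--
--     for step in range(N - 2, -1, -1):
--         for e in range(E + 1):
--             currMax = 0
--             for consume in range(e, -1, -1):
--                 next = e - consume + R
--                 if next > E:
--                     next = E
--                 thisGain = consume * value[step] + memo[next]
--                 if thisGain > currMax:
--                     currMax = thisGain
--             prevMemo[e] = currMax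
--         temp = prevMemo
--         prevMemo = memo
--         memo = temp
--     return memo[E]
-- ===== SOURCE B (Python) =====
-- def getGain(E, R, N, value):
--     # bottom row: only the last activity remains
--     memo = [value[-1] * i for i in range(E + 1)]
--
--     def row(v, memo):
--         # answer every energy level in O(1) with a running prefix max of
--         # memo[min(e+R, E)] - e*v
--         best = memo[min(R, E)]
--         out = [max(0, best)]
--         for e in range(1, E + 1):
--             cand = memo[min(e + R, E)] - e * v
--             if cand > best:
--                 best = cand
--             out.append(max(0, e * v + best))
--         return out
--
--     for v in reversed(value[0:max(N - 1, 0)]):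
--         memo = row(v, memo)
--     return memo[E]
-- ===== Notes on version B (the rewrite author's own statement) =====
-- stated objective: alternative
-- what changed: Replaces A's inner scan over every possible consumption by a running prefix maximum of memo[min(e+R,E)] - e*v (each energy level answered in O(1) per step), and folds over the reversed slice of activity values instead of indexing by step.
import Mathlib
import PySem

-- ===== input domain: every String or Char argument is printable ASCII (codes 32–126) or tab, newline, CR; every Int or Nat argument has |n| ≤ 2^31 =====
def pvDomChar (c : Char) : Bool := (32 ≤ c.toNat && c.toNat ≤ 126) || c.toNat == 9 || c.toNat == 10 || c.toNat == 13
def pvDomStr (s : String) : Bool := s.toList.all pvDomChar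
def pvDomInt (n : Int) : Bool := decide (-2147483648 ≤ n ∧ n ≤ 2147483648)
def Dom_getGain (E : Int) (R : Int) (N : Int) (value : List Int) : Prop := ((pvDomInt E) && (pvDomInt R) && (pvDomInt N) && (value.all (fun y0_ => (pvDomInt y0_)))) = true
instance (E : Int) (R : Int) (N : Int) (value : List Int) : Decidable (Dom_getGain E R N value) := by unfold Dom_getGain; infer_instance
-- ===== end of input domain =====

-- B answers each energy level with a running prefix maximum of memo[min(e+R,E)] - e*v instead of
-- A's inner scan over all consumptions, and folds over the reversed slice of activity values
-- instead of indexing by step. Return values agree on all of Pre_.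

-- ===== PORT A =====
-- inner loop 'for consume in range(e, -1, -1)' computing currMax (pyGetD default 0 is never hit inside Pre_)
def aInner (E : Int) (R : Int) (v : Int) (memo : List Int) (e : Int) : Int :=
  (PySem.List.pyRange e (-1) (-1)).foldl (fun currMax consume =>
    let next := e - consume + R
    let next2 := if next > E then E else next
    let thisGain := consume * v + PySem.List.pyGetD memo next2 0
    if thisGain > currMax then thisGain else currMax) 0

-- 'for e in range(E + 1): prevMemo[e] = currMax' — builds the new memo row
def aStep (E : Int) (R : Int) (v : Int) (memo : List Int) : List Int :=
  (PySem.List.pyRange 0 (E + 1) 1).map (fun e => aInner E R v memo e)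

def getGain (E : Int) (R : Int) (N : Int) (value : List Int) : Int :=
  let memo0 := (PySem.List.pyRange 0 (E + 1) 1).map (fun i => PySem.List.pyGetD value (-1) 0 * i)
  let memo := (PySem.List.pyRange (N - 2) (-1) (-1)).foldl
      (fun memo step => aStep E R (PySem.List.pyGetD value step 0) memo) memo0
  PySem.List.pyGetD memo E 0

-- ===== PORT B =====
-- the loop 'for e in range(1, E + 1)' of row: fuel = number of iterations left, e = current level,
-- best = running maximum; builds out front-to-back by cons (Python appends)
def bRowGo (E : Int) (R : Int) (v : Int) (memo : List Int) : Nat → Int → Int → List Int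
  | 0, _, _ => []
  | m + 1, e, best =>
      let cand := PySem.List.pyGetD memo (min (e + R) E) 0 - e * v
      let best' := if cand > best then cand else best
      max 0 (e * v + best') :: bRowGo E R v memo m (e + 1) best'

-- row(v, memo): first entry (e = 0) computed before the loop, then e = 1..E
def bRow (E : Int) (R : Int) (v : Int) (memo : List Int) : List Int :=
  let best := PySem.List.pyGetD memo (min R E) 0
  max 0 best :: bRowGo E R v memo E.toNat 1 best

def getGain_alt (E : Int) (R : Int) (N : Int) (value : List Int) : Int :=
  let memo0 := (PySem.List.pyRange 0 (E + 1) 1).map (fun i => PySem.List.pyGetD value (-1) 0 * i)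
  let memo := (PySem.List.slice value (some 0) (some (max (N - 1) 0))).reverse.foldl
      (fun memo v => bRow E R v memo) memo0
  PySem.List.pyGetD memo E 0

-- ===== PRECONDITION & SPEC =====
-- Pre_ excludes exactly the inputs on which the Python A raises: E < 0 or value == [] (IndexError on memo[E]
-- resp. value[-1]), and for N ≥ 2 a step index beyond value (IndexError on value[step]) or R < -(E+1)
-- (IndexError: the index e-consume+R falls below -len(memo)).
def Pre_getGain (E : Int) (R : Int) (N : Int) (value : List Int) : Prop :=
  0 ≤ E ∧ value ≠ [] ∧ (2 ≤ N → (N ≤ (value.length : Int) + 1 ∧ -(E + 1) ≤ R))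
instance (E : Int) (R : Int) (N : Int) (value : List Int) : Decidable (Pre_getGain E R N value) := by unfold Pre_getGain; infer_instance
def pvWitness_getGain : Int × Int × Int × List Int := (3, 1, 2, [2, 5])

def Spec_getGain (E : Int) (R : Int) (N : Int) (value : List Int) (out : Int) : Prop := out = getGain_alt E R N value
instance (E : Int) (R : Int) (N : Int) (value : List Int) (out : Int) : Decidable (Spec_getGain E R N value out) := by unfold Spec_getGain; infer_instance

-- ===== CLAIM (what is proved, stated in full; the proofs are below) =====
def Claim_equal_getGain : Prop := ∀ (E : Int) (R : Int) (N : Int) (value : List Int), Dom_getGain E R N value → Pre_getGain E R N value → Spec_getGain E R N value (getGain E R N value)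

-- ===== LEMMAS AND PROOFS =====

-- the quantity B's running maximum tracks, at index i
def candF (E : Int) (R : Int) (v : Int) (memo : List Int) (i : Nat) : Int :=
  PySem.List.pyGetD memo (min ((i : Int) + R) E) 0 - (i : Int) * v

-- prefix maximum of h over 0..k
def preMax (h : Nat → Int) : Nat → Int
  | 0 => h 0
  | (k + 1) => max (preMax h k) (h (k + 1))

-- the common value of A's and B's new row at energy k
def rowF (E : Int) (R : Int) (v : Int) (memo : List Int) (k : Nat) : Int :=
  max 0 ((k : Int) * v + preMax (candF E R v memo) k)

theorem if_gt_eq_max (a b : Int) : (if b > a then b else a) = max a b := by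
  split <;> omega

theorem foldl_max_shift (c : Int) (h : Nat → Int) :
    ∀ (k : Nat) (a : Int),
      (List.range (k + 1)).foldl (fun a i => max a (c + h i)) a = max a (c + preMax h k) := by
  intro k
  induction k with
  | zero => intro a; simp [preMax, List.range_succ]
  | succ k ih =>
      intro a
      rw [List.range_succ, List.foldl_append, ih]
      simp only [List.foldl_cons, List.foldl_nil, preMax]
      omega

theorem aInner_eq_rowF (E R v : Int) (memo : List Int) (k : Nat) :
    aInner E R v memo (k : Int) = rowF E R v memo k := by
  unfold aInner
  rw [PySem.List.pyRange_neg_one]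
  have hn : ((k : Int) - (-1)).toNat = k + 1 := by omega
  rw [hn, List.foldl_map]
  have hbody : (fun (currMax : Int) (i : Nat) =>
      let next := (k : Int) - ((k : Int) - (i : Int)) + R
      let next2 := if next > E then E else next
      let thisGain := ((k : Int) - (i : Int)) * v + PySem.List.pyGetD memo next2 0
      if thisGain > currMax then thisGain else currMax)
      = (fun (a : Int) (i : Nat) => max a ((k : Int) * v + candF E R v memo i)) := by
    funext a i
    have h1 : (k : Int) - ((k : Int) - (i : Int)) + R = (i : Int) + R := by ring
    have h2 : (if (i : Int) + R > E then E else (i : Int) + R) = min ((i : Int) + R) E := by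
      split <;> omega
    simp only [h1, h2, candF]
    rw [if_gt_eq_max]
    ring_nf
  rw [hbody, foldl_max_shift]
  simp [rowF]

theorem bRowGo_eq_map (E R v : Int) (memo : List Int) :
    ∀ (m k : Nat),
      bRowGo E R v memo m ((k : Int) + 1) (preMax (candF E R v memo) k)
        = (List.range' (k + 1) m).map (rowF E R v memo) := by
  intro m
  induction m with
  | zero => intro k; simp [bRowGo]
  | succ m ih =>
      intro k
      rw [List.range'_succ, List.map_cons]
      show bRowGo E R v memo (m + 1) ((k : Int) + 1) (preMax (candF E R v memo) k) = _
      rw [bRowGo]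
      have hc : PySem.List.pyGetD memo (min (((k : Int) + 1) + R) E) 0 - ((k : Int) + 1) * v
          = candF E R v memo (k + 1) := by
        simp [candF]
      have hb : (if candF E R v memo (k + 1) > preMax (candF E R v memo) k
            then candF E R v memo (k + 1) else preMax (candF E R v memo) k)
          = preMax (candF E R v memo) (k + 1) := by
        rw [if_gt_eq_max]; simp [preMax]
      simp only [hc, hb]
      have he : ((k : Int) + 1) = (((k + 1 : Nat) : Int)) := by push_cast; ring
      rw [he]
      have hgo := ih (k + 1)
      refine List.cons_eq_cons.mpr ⟨by simp [rowF], ?_⟩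
      exact_mod_cast hgo

theorem bRow_eq_aStep (E R v : Int) (memo : List Int) (hE : 0 ≤ E) :
    bRow E R v memo = aStep E R v memo := by
  unfold bRow aStep
  obtain ⟨m, hm⟩ : ∃ m : Nat, E = (m : Int) := ⟨E.toNat, by omega⟩
  subst hm
  have h1 : ((m : Int) + 1) = (((m + 1 : Nat)) : Int) := by push_cast; ring
  rw [h1, PySem.List.pyRange_zero_nat, List.map_map]
  have hmap : (fun e => aInner (m : Int) R v memo e) ∘ (fun (k : Nat) => (k : Int))
      = rowF (m : Int) R v memo := by
    funext k
    exact aInner_eq_rowF (m : Int) R v memo k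
  rw [hmap]
  have hrange : List.range (m + 1) = 0 :: List.range' 1 m := by
    rw [List.range_eq_range', List.range'_succ]
  rw [hrange, List.map_cons]
  have hbest : PySem.List.pyGetD memo (min R (m : Int)) 0 = candF (m : Int) R v memo 0 := by
    simp [candF]
  have htoNat : ((m : Int)).toNat = m := by omega
  rw [hbest, htoNat]
  refine List.cons_eq_cons.mpr ⟨by simp [rowF, preMax], ?_⟩
  have := bRowGo_eq_map (m : Int) R v memo m 0
  simpa [preMax] using this

-- the list of activity values A visits, in A's (descending-step) order, equals
-- the reversed slice B folds over
theorem steps_eq_rev_slice (N : Int) (value : List Int)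
    (_hne : value ≠ []) (hN : 2 ≤ N → N ≤ (value.length : Int) + 1) :
    (PySem.List.pyRange (N - 2) (-1) (-1)).map (fun step => PySem.List.pyGetD value step 0)
      = (PySem.List.slice value (some 0) (some (max (N - 1) 0))).reverse := by
  by_cases h2 : 2 ≤ N
  · obtain ⟨m, hm⟩ : ∃ m : Nat, N - 1 = (m : Int) := ⟨(N - 1).toNat, by omega⟩
    have hmax : max (N - 1) 0 = (m : Int) := by omega
    rw [hmax]
    rw [PySem.List.slice_zero_start, PySem.List.slice_to_natCast]
    rw [PySem.List.pyRange_neg_one]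
    have hn : (N - 2 - (-1)).toNat = m := by omega
    rw [hn, List.map_map]
    have hml : m ≤ value.length := by
      have := hN h2; omega
    apply List.ext_getElem
    · simp [hml]
    · intro i h1 h2'
      have hi : i < m := by simpa using h1
      simp only [List.getElem_map, List.getElem_range, Function.comp_apply]
      rw [List.getElem_reverse]
      have hlen : (List.take m value).length = m := by simp [hml]
      have hidx : N - 2 - (i : Int) = ((m - 1 - i : Nat) : Int) := by
        push_cast [Nat.cast_sub (by omega : i ≤ m - 1), Nat.cast_sub (by omega : 1 ≤ m)]
        omega
      rw [hidx, PySem.List.pyGetD_natCast]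
      rw [List.getD_eq_getElem _ _ (by simp [hlen] at h2' ⊢; omega)]
      simp [hlen, List.getElem_take]
  · have hr : PySem.List.pyRange (N - 2) (-1) (-1) = [] :=
      PySem.List.pyRange_neg_one_eq_nil (by omega)
    have hmax : max (N - 1) 0 = ((0 : Nat) : Int) := by omega
    rw [hr, hmax, PySem.List.slice_zero_start, PySem.List.slice_to_natCast]
    simp

-- ===== VERDICT (by name: the statement is the Claim_ definition above) =====
theorem getGain_spec : Claim_equal_getGain := by
  intro E R N value _ hpre
  obtain ⟨hE, hne0, hN⟩ := hpre
  unfold Spec_getGain getGain getGain_alt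
  have hsteps := steps_eq_rev_slice N value hne0 (fun h => (hN h).1)
  have hf : (fun (memo : List Int) (v : Int) => bRow E R v memo)
      = fun (memo : List Int) (v : Int) => aStep E R v memo := by
    funext memo v
    exact bRow_eq_aStep E R v memo hE
  simp only [← hsteps, List.foldl_map, hf]
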